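-- pv_equiv track=rewrite | github.com/orkan2004/JP-AlgHint | eval/verify_witness.py | rsq_answers
-- ===== SOURCE A (Python) =====
-- def rsq_answers(arr, queries, one_based=False):
--     n=len(arr)
--     pref=[0]*(n+1)
--     for i,x in enumerate(arr,1):
--         pref[i]=pref[i-1]+x
--     ans=[]
--     for l,r in queries:
--         if one_based:
--             L=max(1,l); R=min(n,r)
--             ans.append(pref[R]-pref[L-1] if 1<=L<=R<=n else 0)
--         else:
--             L=max(0,l); R=min(n-1,r)
--             if L<=R: ans.append(pref[R+1]-pref[L])
--             else: ans.append(0)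
--     return ans
-- ===== SOURCE B (Python) =====
-- def rsq_answers(arr, queries, one_based=False):
--     n = len(arr)
--     if one_based:
--         return [sum(arr[max(1, l) - 1:min(n, r)]) if max(1, l) <= min(n, r) else 0
--                 for l, r in queries]
--     return [sum(arr[max(0, l):min(n - 1, r) + 1]) if max(0, l) <= min(n - 1, r) else 0
--             for l, r in queries]
-- ===== Notes on version B (the rewrite author's own statement) =====
-- stated objective: simpler
-- what changed: Drops the precomputed prefix-sum table and answers each query by directly summing the clamped slice in a list comprehension.
import Mathlib
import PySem

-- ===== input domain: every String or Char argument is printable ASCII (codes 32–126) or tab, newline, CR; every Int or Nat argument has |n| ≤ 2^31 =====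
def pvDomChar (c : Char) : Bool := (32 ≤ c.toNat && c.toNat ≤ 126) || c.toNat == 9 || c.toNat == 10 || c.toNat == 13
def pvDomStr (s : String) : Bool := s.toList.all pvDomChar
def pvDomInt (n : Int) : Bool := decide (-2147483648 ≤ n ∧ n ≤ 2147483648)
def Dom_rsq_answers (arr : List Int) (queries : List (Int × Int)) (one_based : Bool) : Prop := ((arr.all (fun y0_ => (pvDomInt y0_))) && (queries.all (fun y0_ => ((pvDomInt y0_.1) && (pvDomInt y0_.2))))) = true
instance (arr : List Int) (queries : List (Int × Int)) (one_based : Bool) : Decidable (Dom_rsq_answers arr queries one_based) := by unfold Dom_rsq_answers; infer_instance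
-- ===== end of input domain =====

-- B replaces A's prefix-sum table with a direct sum over the clamped slice per query (simpler; not faster).

-- ===== PORT A =====
def rsq_answers (arr : List Int) (queries : List (Int × Int)) (one_based : Bool) : List Int :=
  let n : Int := arr.length
  -- pref = [0]*(n+1); for i,x in enumerate(arr,1): pref[i] = pref[i-1] + x
  let pref : List Int :=
    (PySem.List.enumerate arr 1).foldl
      (fun p ix => PySem.List.pySetD p ix.1 (PySem.List.pyGetD p (ix.1 - 1) 0 + ix.2))
      (List.replicate (arr.length + 1) 0)
  queries.foldl
    (fun ans lr =>
      let l := lr.1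
      let r := lr.2
      if one_based then
        let L := max 1 l
        let R := min n r
        ans ++ [if 1 ≤ L ∧ L ≤ R ∧ R ≤ n then
                  PySem.List.pyGetD pref R 0 - PySem.List.pyGetD pref (L - 1) 0
                else 0]
      else
        let L := max 0 l
        let R := min (n - 1) r
        if L ≤ R then ans ++ [PySem.List.pyGetD pref (R + 1) 0 - PySem.List.pyGetD pref L 0]
        else ans ++ [0])
    []

-- ===== PORT B =====
def rsq_answers_alt (arr : List Int) (queries : List (Int × Int)) (one_based : Bool) : List Int :=
  let n : Int := arr.length
  if one_based then
    queries.map (fun lr =>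
      if max 1 lr.1 ≤ min n lr.2 then
        (PySem.List.slice arr (some (max 1 lr.1 - 1)) (some (min n lr.2))).sum
      else 0)
  else
    queries.map (fun lr =>
      if max 0 lr.1 ≤ min (n - 1) lr.2 then
        (PySem.List.slice arr (some (max 0 lr.1)) (some (min (n - 1) lr.2 + 1))).sum
      else 0)

-- ===== PRECONDITION & SPEC =====
def Spec_rsq_answers (arr : List Int) (queries : List (Int × Int)) (one_based : Bool) (out : List Int) : Prop := out = rsq_answers_alt arr queries one_based
instance (arr : List Int) (queries : List (Int × Int)) (one_based : Bool) (out : List Int) : Decidable (Spec_rsq_answers arr queries one_based out) := by unfold Spec_rsq_answers; infer_instance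

-- ===== CLAIM (what is proved, stated in full; the proofs are below) =====
def Claim_equal_rsq_answers : Prop := ∀ (arr : List Int) (queries : List (Int × Int)) (one_based : Bool), Dom_rsq_answers arr queries one_based → Spec_rsq_answers arr queries one_based (rsq_answers arr queries one_based)

-- ===== LEMMAS AND PROOFS =====

-- invariant of A's prefix-building loop: after folding over enumerate xs (s+1),
-- slot j holds a + sum of the first (j-s) of xs for s < j ≤ s+|xs|, other slots unchanged
theorem pref_fold_inv (xs : List Int) : ∀ (s : Nat) (p : List Int) (a : Int),
    s + xs.length < p.length → p[s]? = some a →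
    ∀ j : Nat,
      ((PySem.List.enumerate xs ((s : Int) + 1)).foldl
        (fun q ix => PySem.List.pySetD q ix.1 (PySem.List.pyGetD q (ix.1 - 1) 0 + ix.2)) p)[j]?
      = if s < j ∧ j ≤ s + xs.length then some (a + (xs.take (j - s)).sum) else p[j]? := by
  induction xs with
  | nil =>
    intro s p a _ _ j
    simp only [PySem.List.enumerate_nil, List.foldl_nil, List.length_nil, Nat.add_zero]
    rw [if_neg (by omega)]
  | cons x xs ih =>
    intro s p a hlen hs j
    rw [PySem.List.enumerate_cons]
    simp only [List.foldl_cons]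
    have hcast : (s : Int) + 1 = ((s + 1 : Nat) : Int) := by push_cast; ring
    have hstep : (PySem.List.pySetD p ((s : Int) + 1)
        (PySem.List.pyGetD p ((s : Int) + 1 - 1) 0 + x)) = p.set (s + 1) (a + x) := by
      have h1 : (s : Int) + 1 - 1 = ((s : Nat) : Int) := by ring
      rw [h1, PySem.List.pyGetD_natCast, hcast, PySem.List.pySetD_natCast]
      congr 1
      have : p.getD s 0 = a := by
        simp [List.getD_eq_getElem?_getD, hs]
      rw [this]
    rw [hstep]
    simp only [List.length_cons] at hlen
    have hlen' : (s + 1) + xs.length < (p.set (s + 1) (a + x)).length := by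
      simp only [List.length_set]; omega
    have hs' : (p.set (s + 1) (a + x))[s + 1]? = some (a + x) := by
      rw [List.getElem?_set_eq_of_lt (a + x) (by omega)]
    have h2 : ((s : Int) + 1) + 1 = ((s + 1 : Nat) : Int) + 1 := by push_cast; ring
    rw [h2, ih (s + 1) (p.set (s + 1) (a + x)) (a + x) hlen' hs' j]
    by_cases hj1 : j = s + 1
    · subst hj1
      simp only [List.length_cons]
      rw [if_neg (by omega), if_pos (by omega), hs']
      have : (s + 1) - s = 1 := by omega
      simp [this]
    · by_cases hj2 : s + 1 < j ∧ j ≤ s + 1 + xs.length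
      · rw [if_pos hj2, if_pos (by simp only [List.length_cons]; omega)]
        have h3 : j - s = (j - (s + 1)) + 1 := by omega
        rw [h3]
        simp [List.sum_cons]
        ring
      · rw [if_neg hj2, if_neg (by simp only [List.length_cons]; omega)]
        exact List.getElem?_set_ne (by omega)

-- A's pref table holds prefix sums of arr
theorem pref_char (arr : List Int) (j : Nat) (hj : j ≤ arr.length) :
    ((PySem.List.enumerate arr 1).foldl
      (fun q ix => PySem.List.pySetD q ix.1 (PySem.List.pyGetD q (ix.1 - 1) 0 + ix.2))
      (List.replicate (arr.length + 1) 0))[j]?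
    = some ((arr.take j).sum) := by
  have h0 : (List.replicate (arr.length + 1) (0 : Int))[0]? = some 0 := by
    rw [List.getElem?_eq_getElem (by simp)]
    simp
  have hlen : 0 + arr.length < (List.replicate (arr.length + 1) (0 : Int)).length := by
    simp
  have := pref_fold_inv arr 0 (List.replicate (arr.length + 1) 0) 0 hlen h0 j
  have hz : ((0 : Nat) : Int) + 1 = 1 := by norm_num
  rw [hz] at this
  rw [this]
  by_cases hj0 : j = 0
  · subst hj0; simp
  · rw [if_pos (by omega)]
    simp

-- difference of prefix sums = sum of the middle segment
theorem take_sum_sub (arr : List Int) (a b : Nat) (hab : a ≤ b) :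
    (arr.take b).sum - (arr.take a).sum = ((arr.drop a).take (b - a)).sum := by
  have h : arr.take b = arr.take a ++ (arr.drop a).take (b - a) := by
    rw [← List.take_add]
    congr 1
    omega
  rw [h, List.sum_append]
  ring

-- pyGetD on the pref table, for a nonnegative in-range Int index
theorem pref_getD (arr : List Int) (i : Int) (h0 : 0 ≤ i) (hn : i ≤ (arr.length : Int)) :
    PySem.List.pyGetD
      ((PySem.List.enumerate arr 1).foldl
        (fun q ix => PySem.List.pySetD q ix.1 (PySem.List.pyGetD q (ix.1 - 1) 0 + ix.2))
        (List.replicate (arr.length + 1) 0)) i 0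
    = (arr.take i.toNat).sum := by
  obtain ⟨m, rfl⟩ : ∃ m : Nat, i = (m : Int) := ⟨i.toNat, by omega⟩
  rw [PySem.List.pyGetD_natCast]
  have hj : m ≤ arr.length := by exact_mod_cast hn
  simp [List.getD_eq_getElem?_getD, pref_char arr m hj]

-- fold with append-singleton body = map
theorem foldl_snoc {A : Type} (step : List Int → A → List Int) (g : A → Int)
    (h : ∀ a q, step a q = a ++ [g q]) :
    ∀ (qs : List A) (acc : List Int), qs.foldl step acc = acc ++ qs.map g := by
  intro qs
  induction qs with
  | nil => intro acc; simp
  | cons q qs ih =>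
    intro acc
    simp only [List.foldl_cons, List.map_cons, ih, h]
    simp

-- ===== VERDICT (by name: the statement is the Claim_ definition above) =====
theorem rsq_answers_spec : Claim_equal_rsq_answers := by
  intro arr queries one_based _
  unfold Spec_rsq_answers rsq_answers rsq_answers_alt
  dsimp only
  set n : Int := (arr.length : Int) with hn
  set pref := (PySem.List.enumerate arr 1).foldl
      (fun q ix => PySem.List.pySetD q ix.1 (PySem.List.pyGetD q (ix.1 - 1) 0 + ix.2))
      (List.replicate (arr.length + 1) 0) with hpref
  cases one_based with
  | true =>
    simp only [if_true]
    refine (foldl_snoc _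
      (fun lr : Int × Int =>
        if 1 ≤ max 1 lr.1 ∧ max 1 lr.1 ≤ min n lr.2 ∧ min n lr.2 ≤ n then
          PySem.List.pyGetD pref (min n lr.2) 0 - PySem.List.pyGetD pref (max 1 lr.1 - 1) 0
        else 0)
      (fun a q => rfl) queries []).trans ?_
    rw [List.nil_append]
    refine List.map_congr_left (fun lr _ => ?_)
    by_cases hg : max 1 lr.1 ≤ min n lr.2
    · rw [if_pos ⟨le_max_left 1 lr.1, hg, min_le_left n lr.2⟩, if_pos hg]
      have hL0 : (0 : Int) ≤ max 1 lr.1 - 1 := by omega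
      have hR0 : (0 : Int) ≤ min n lr.2 := by
        have := le_max_left (1 : Int) lr.1; omega
      rw [hpref, pref_getD arr _ hR0 (min_le_left n lr.2),
        pref_getD arr _ hL0 (by have := min_le_left n lr.2; omega),
        PySem.List.slice_toNat arr hL0 hR0,
        take_sum_sub arr _ _ (by omega)]
    · rw [if_neg (by omega), if_neg hg]
  | false =>
    simp only [Bool.false_eq_true, if_false]
    refine (foldl_snoc _
      (fun lr : Int × Int =>
        if max 0 lr.1 ≤ min (n - 1) lr.2 then
          PySem.List.pyGetD pref (min (n - 1) lr.2 + 1) 0 - PySem.List.pyGetD pref (max 0 lr.1) 0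
        else 0)
      (fun a q => by by_cases hc : max 0 q.1 ≤ min (n - 1) q.2 <;> simp [hc]) queries []).trans ?_
    rw [List.nil_append]
    refine List.map_congr_left (fun lr _ => ?_)
    by_cases hg : max 0 lr.1 ≤ min (n - 1) lr.2
    · rw [if_pos hg, if_pos hg]
      have hL0 : (0 : Int) ≤ max 0 lr.1 := le_max_left 0 lr.1
      have hR0 : (0 : Int) ≤ min (n - 1) lr.2 + 1 := by
        have := le_trans hL0 hg; omega
      have hRn : min (n - 1) lr.2 + 1 ≤ n := by
        have := min_le_left (n - 1) lr.2; omega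
      rw [hpref, pref_getD arr _ hR0 hRn, pref_getD arr _ hL0 (by omega),
        PySem.List.slice_toNat arr hL0 hR0,
        take_sum_sub arr _ _ (by omega)]
    · rw [if_neg hg, if_neg hg]
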